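-- pv_equiv track=rewrite | github.com/rsaha77/advent_of_code | 2023/python/1.py | isnewdig
-- ===== SOURCE A (Python) =====
-- mp = {
--     "one": 1,
--     "two": 2,
--     "three": 3,
--     "four": 4,
--     "five": 5,
--     "six": 6,
--     "seven": 7,
--     "eight": 8,
--     "nine": 9
-- }
--
-- def isnewdig (line, idx, rev=False):
-- 	n = len(line)
-- 	s = ""
-- 	if not rev:
-- 		for i in range (idx, n):
-- 			l = line [i]
-- 			s += l
-- 			num = mp.get(s, None)
-- 			if num != None:
-- 				return num
-- 	else:
-- 		for i in range (idx, n):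
-- 			l = line [i]
-- 			s += l
-- 			num = mp.get(s, None)
-- 			if num != None:
-- 				return num
--
-- 	return -1
-- ===== SOURCE B (Python) =====
-- mp = {
--     "one": 1,
--     "two": 2,
--     "three": 3,
--     "four": 4,
--     "five": 5,
--     "six": 6,
--     "seven": 7,
--     "eight": 8,
--     "nine": 9
-- }
--
-- def isnewdig(line, idx, rev=False):
--     for word, val in mp.items():
--         if line.startswith(word, idx):
--             return val
--     return -1
-- ===== Notes on version B (the rewrite author's own statement) =====
-- stated objective: faster
-- what changed: Instead of growing a substring character by character from idx and looking each prefix up in the dict, B loops once over the nine digit words and probes the string with line.startswith(word, idx); the words are prefix-free, so at most one can match and A's result (and its -1 default) is preserved.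
-- outside the precondition, e.g. on isnewdig('eon', -2, False): A returns 1, B returns -1
import Mathlib
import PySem

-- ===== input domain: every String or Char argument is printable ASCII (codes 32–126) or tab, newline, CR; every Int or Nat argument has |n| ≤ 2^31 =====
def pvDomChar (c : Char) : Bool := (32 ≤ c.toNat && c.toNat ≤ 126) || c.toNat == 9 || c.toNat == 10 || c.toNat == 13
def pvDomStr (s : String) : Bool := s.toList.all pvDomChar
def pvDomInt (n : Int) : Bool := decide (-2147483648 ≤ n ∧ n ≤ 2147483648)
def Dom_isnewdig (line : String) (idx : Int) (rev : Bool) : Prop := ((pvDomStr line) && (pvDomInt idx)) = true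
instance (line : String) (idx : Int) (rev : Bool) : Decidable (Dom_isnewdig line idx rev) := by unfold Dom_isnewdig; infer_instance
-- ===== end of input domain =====

-- B replaces A's char-by-char prefix growth with one pass over the nine digit words,
-- probing line.startswith(word, idx): simpler, same results (the words are prefix-free).

-- the module-level dict mp (strings ported as List Char)
def pvMp : PySem.Dict (List Char) Int :=
  PySem.Dict.ofList
    [("one".toList, 1), ("two".toList, 2), ("three".toList, 3), ("four".toList, 4),
     ("five".toList, 5), ("six".toList, 6), ("seven".toList, 7), ("eight".toList, 8),
     ("nine".toList, 9)]

-- ===== PORT A =====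
-- the loop 'for i in range(idx, n): l = line[i]; s += l; num = mp.get(s); if num != None: return num'
def isnewdigLoopA (line : String) (s : List Char) (is_ : List Int) : Int :=
  match is_ with
  | [] => -1                                 -- loop finished: falls through to 'return -1'
  | i :: rest =>
    match PySem.Str.pyGet? line i with
    | none => -1                             -- IndexError; unreachable under Pre_ (0 ≤ idx keeps every i of range(idx, n) in range)
    | some l =>
      match PySem.Dict.get? pvMp (s ++ [l]) with
      | some num => num
      | none => isnewdigLoopA line (s ++ [l]) rest

def isnewdig (line : String) (idx : Int) (rev : Bool) : Int :=
  let n : Int := PySem.Str.len line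
  if rev = false then
    isnewdigLoopA line [] (PySem.List.pyRange idx n)   -- the two branches of A are textually identical
  else
    isnewdigLoopA line [] (PySem.List.pyRange idx n)

-- ===== PORT B =====
-- line.startswith(word, idx): exact as startswith on the slice line[idx:] (CPython's start clamping = slice clamping)
def pvStartswithFrom (line : String) (w : List Char) (idx : Int) : Bool :=
  PySem.Chars.startswith (PySem.List.slice line.toList (some idx) none) w

-- 'for word, val in mp.items(): if line.startswith(word, idx): return val' / 'return -1'
def isnewdigAltGo (line : String) (idx : Int) (items : List (List Char × Int)) : Int :=
  match items with
  | [] => -1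
  | (w, v) :: rest => if pvStartswithFrom line w idx then v else isnewdigAltGo line idx rest

def isnewdig_alt (line : String) (idx : Int) (rev : Bool) : Int :=
  isnewdigAltGo line idx pvMp.items

-- ===== PRECONDITION & SPEC =====
-- Pre_ restricts to the helper's natural domain idx ≥ 0 (all real callers pass non-negative indices):
-- for -len(line) ≤ idx < 0 A reads characters through Python's negative-index wraparound and accumulates
-- them across the end→start boundary of the string — an accidental behaviour B does not reproduce —
-- and for idx < -len(line) A raises IndexError while B returns normally.
def Pre_isnewdig (line : String) (idx : Int) (rev : Bool) : Prop := 0 ≤ idx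
instance (line : String) (idx : Int) (rev : Bool) : Decidable (Pre_isnewdig line idx rev) := by unfold Pre_isnewdig; infer_instance
def pvWitness_isnewdig : String × Int × Bool := ("xtwone3d", 3, false)

def Spec_isnewdig (line : String) (idx : Int) (rev : Bool) (out : Int) : Prop := out = isnewdig_alt line idx rev
instance (line : String) (idx : Int) (rev : Bool) (out : Int) : Decidable (Spec_isnewdig line idx rev out) := by unfold Spec_isnewdig; infer_instance

-- ===== CLAIM (what is proved, stated in full; the proofs are below) =====
def Claim_equal_isnewdig : Prop := ∀ (line : String) (idx : Int) (rev : Bool), Dom_isnewdig line idx rev → Pre_isnewdig line idx rev → Spec_isnewdig line idx rev (isnewdig line idx rev)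

-- ===== LEMMAS AND PROOFS =====

-- the common reference point of both ports: value of the first mp entry whose key is a prefix of t, else -1
def pvFind (p : (List Char × Int) → Bool) : Int :=
  match pvMp.items.find? p with
  | some e => e.2
  | none => -1

-- the predicate characterising A's loop state: keys reachable from accumulator s inside s ++ r
def pvPred (s r : List Char) (e : List Char × Int) : Bool :=
  decide (s <+: e.1 ∧ e.1 <+: s ++ r ∧ e.1 ≠ s)

-- mp's keys are prefix-free (hence pairwise distinct as entries)
theorem pvMp_prefixFree :
    ∀ e1 ∈ pvMp.items, ∀ e2 ∈ pvMp.items, e1.1 <+: e2.1 → e1 = e2 := by decide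

theorem pvMp_keys_ne_nil : ∀ e ∈ pvMp.items, e.1 ≠ [] := by decide

theorem find?_congr_mem {α : Type} (l : List α) (p q : α → Bool)
    (h : ∀ x ∈ l, p x = q x) : l.find? p = l.find? q := by
  induction l with
  | nil => rfl
  | cons a as ih =>
    simp only [List.find?_cons, h a (by simp)]
    cases q a
    · exact ih (fun x hx => h x (by simp [hx]))
    · rfl

theorem find?_eq_of_unique {α : Type} (l : List α) (p : α → Bool) (e₀ : α)
    (he : e₀ ∈ l) (hp : p e₀ = true) (hu : ∀ e ∈ l, p e = true → e = e₀) :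
    l.find? p = some e₀ := by
  induction l with
  | nil => cases he
  | cons a as ih =>
    by_cases hpa : p a = true
    · have hae : a = e₀ := hu a (by simp) hpa
      subst hae
      simp [List.find?_cons, hpa]
    · have hpa' : p a = false := by simpa using hpa
      simp only [List.find?_cons, hpa']
      have he' : e₀ ∈ as := by
        rcases List.mem_cons.mp he with h | h
        · exact absurd (h ▸ hp) hpa
        · exact h
      exact ih he' (fun e hm => hu e (by simp [hm]))

-- a strict prefix is longer
theorem length_lt_of_prefix_ne {s w : List Char} (h : s <+: w) (hne : w ≠ s) :
    s.length < w.length := by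
  rcases Nat.lt_or_ge s.length w.length with hlt | hge
  · exact hlt
  · exact absurd (h.eq_of_length_le hge).symm hne

-- A's loop over range(j, n), with accumulator s, computes the first matching reachable key
theorem loopA_eq_find (line : String) :
    ∀ (r : List Char) (j : Int) (s : List Char), 0 ≤ j →
      line.toList.drop j.toNat = r →
      isnewdigLoopA line s (PySem.List.pyRange j (line.toList.length : Int)) =
        pvFind (pvPred s r) := by
  intro r
  induction r with
  | nil =>
    intro j s hj hd
    have hjn : (line.toList.length : Int) ≤ j := by
      have : line.toList.length ≤ j.toNat := by
        by_contra hlt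
        push_neg at hlt
        have := List.drop_eq_getElem_cons hlt
        rw [hd] at this
        cases this
      omega
    rw [PySem.List.pyRange_one_eq_nil hjn]
    have hnone : pvMp.items.find? (pvPred s []) = none := by
      rw [List.find?_eq_none]
      intro e _ hpe
      simp only [pvPred, decide_eq_true_eq, List.append_nil] at hpe
      exact hpe.2.2 (hpe.2.1.eq_of_length (Nat.le_antisymm hpe.2.1.length_le hpe.1.length_le))
    simp [isnewdigLoopA, pvFind, hnone]
  | cons c r' ih =>
    intro j s hj hd
    have hjlt : j.toNat < line.toList.length := by
      by_contra hge
      push_neg at hge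
      rw [List.drop_eq_nil_of_le hge] at hd
      cases hd
    have hjltI : j < (line.toList.length : Int) := by omega
    have hgetc : line.toList[j.toNat] = c := by
      have := List.drop_eq_getElem_cons hjlt
      rw [hd] at this
      exact (List.cons.injEq _ _ _ _ ▸ this).1.symm
    have hd' : line.toList.drop (j + 1).toNat = r' := by
      have h1 : (j + 1).toNat = j.toNat + 1 := by omega
      have := List.drop_eq_getElem_cons hjlt
      rw [hd, hgetc] at this
      rw [h1]
      exact (List.cons.injEq _ _ _ _ ▸ this).2.symm
    rw [PySem.List.pyRange_one_cons hjltI]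
    have hpy : PySem.Str.pyGet? line j = some c := by
      rw [PySem.Str.pyGet?_eq]
      show PySem.List.pyGet? line.toList j = some c
      rw [PySem.List.pyGet?_of_nonneg _ hj, List.getElem?_eq_getElem hjlt, hgetc]
    show isnewdigLoopA line s (j :: PySem.List.pyRange (j + 1) (line.toList.length : Int)) = _
    rw [isnewdigLoopA, hpy]
    rcases hmg : PySem.Dict.get? pvMp (s ++ [c]) with _ | v
    · -- no match at this prefix: the loop continues with accumulator s ++ [c]
      have hih := ih (j + 1) (s ++ [c]) (by omega) hd'
      have hcong : pvMp.items.find? (pvPred s (c :: r')) =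
          pvMp.items.find? (pvPred (s ++ [c]) r') := by
        apply find?_congr_mem
        intro e he
        have hkey : e.1 ≠ s ++ [c] := by
          intro hk
          have hmemk := PySem.Dict.mem_keys_of_mem_items pvMp he
          rw [hk] at hmemk
          exact ((PySem.Dict.get?_eq_none_iff_not_mem_keys pvMp _).mp hmg) hmemk
        simp only [pvPred]
        rw [decide_eq_decide]
        constructor
        · rintro ⟨h1, h2, h3⟩
          have hlen := length_lt_of_prefix_ne h1 h3
          have h2' : e.1 <+: (s ++ [c]) ++ r' := by simpa using h2
          have hcmp := List.prefix_or_prefix_of_prefix h2' (List.prefix_append (s ++ [c]) r')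
          rcases hcmp with hc1 | hc2
          · exfalso
            apply hkey
            apply hc1.eq_of_length
            have := hc1.length_le
            simp at this ⊢
            omega
          · exact ⟨hc2, h2', hkey⟩
        · rintro ⟨h1, h2, _⟩
          refine ⟨(List.prefix_append s [c]).trans h1, by simpa using h2, ?_⟩
          intro hk
          have := h1.length_le
          rw [hk] at this
          simp at this
      simp only [hmg, hih, pvFind, hcong]
    · -- match: s ++ [c] is a key; by prefix-freeness it is the unique match of pvPred s (c :: r')
      have hmem : (s ++ [c], v) ∈ pvMp.items := PySem.Dict.mem_items_of_get?_eq_some pvMp hmg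
      have hp0 : pvPred s (c :: r') (s ++ [c], v) = true := by
        simp only [pvPred, decide_eq_true_eq]
        refine ⟨List.prefix_append s [c], ⟨r', by simp⟩, ?_⟩
        intro hk
        have : (s ++ [c]).length = s.length := by rw [hk]
        simp at this
      have hfind : pvMp.items.find? (pvPred s (c :: r')) = some (s ++ [c], v) := by
        apply find?_eq_of_unique _ _ _ hmem hp0
        intro e he hpe
        simp only [pvPred, decide_eq_true_eq] at hpe
        obtain ⟨h1, h2, h3⟩ := hpe
        have h2' : e.1 <+: (s ++ [c]) ++ r' := by simpa using h2
        have hcmp := List.prefix_or_prefix_of_prefix h2'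
          (List.prefix_append (s ++ [c]) r')
        rcases hcmp with hc1 | hc2
        · exact pvMp_prefixFree e he _ hmem hc1
        · exact (pvMp_prefixFree _ hmem e he hc2).symm
      simp [pvFind, hfind, hmg]

-- B's word scan computes the first mp entry whose key is a prefix of line[idx:]
theorem altGo_eq_find (line : String) (idx : Int) :
    ∀ items : List (List Char × Int),
      isnewdigAltGo line idx items =
        (match items.find?
            (fun e => decide (e.1 <+: PySem.List.slice line.toList (some idx) none)) with
         | some e => e.2
         | none => -1) := by
  intro items
  induction items with
  | nil => rfl
  | cons e rest ih =>
    obtain ⟨w, v⟩ := e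
    rw [isnewdigAltGo, List.find?_cons]
    have hsw : pvStartswithFrom line w idx =
        decide (w <+: PySem.List.slice line.toList (some idx) none) := by
      simp only [pvStartswithFrom]
      rcases h : PySem.Chars.startswith (PySem.List.slice line.toList (some idx) none) w with _ | _
      · have := (not_iff_not.mpr (PySem.Chars.startswith_iff
          (PySem.List.slice line.toList (some idx) none) w)).mp (by simp [h])
        simp [this]
      · have := (PySem.Chars.startswith_iff _ w).mp h
        simp [this]
    rw [hsw]
    rcases h : decide (w <+: PySem.List.slice line.toList (some idx) none) with _ | _
    · simpa [h] using ih
    · simp [h]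

-- ===== VERDICT (by name: the statement is the Claim_ definition above) =====
theorem isnewdig_spec : Claim_equal_isnewdig := by
  intro line idx rev _ hpre
  unfold Spec_isnewdig
  have hA : isnewdig line idx rev =
      pvFind (pvPred [] (line.toList.drop idx.toNat)) := by
    have hlen : PySem.Str.len line = (line.toList.length : Int) := PySem.Str.len_eq line
    have := loopA_eq_find line (line.toList.drop idx.toNat) idx [] hpre rfl
    unfold isnewdig
    rcases rev with _ | _ <;> simp only [if_true, if_false, Bool.false_eq_true, hlen] <;> exact this
  have hslice : PySem.List.slice line.toList (some idx) none =
      line.toList.drop idx.toNat := PySem.List.slice_from line.toList hpre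
  have hB : isnewdig_alt line idx rev =
      pvFind (pvPred [] (line.toList.drop idx.toNat)) := by
    unfold isnewdig_alt
    rw [altGo_eq_find line idx pvMp.items]
    unfold pvFind
    have hcong : pvMp.items.find?
        (fun e => decide (e.1 <+: PySem.List.slice line.toList (some idx) none)) =
        pvMp.items.find? (pvPred [] (line.toList.drop idx.toNat)) := by
      apply find?_congr_mem
      intro e he
      simp only [pvPred, hslice, List.nil_append]
      rw [decide_eq_decide]
      constructor
      · intro h
        exact ⟨List.nil_prefix, h, pvMp_keys_ne_nil e he⟩
      · rintro ⟨_, h, _⟩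
        exact h
    rw [hcong]
  rw [hA, hB]
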